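-- pv_equiv track=rewrite | github.com/floriankagerer/bed-bpp-env | src/bed_bpp_env/utils/o3dbpp_pct/resultConverter.py | __prepareSRC_SOLVER
-- ===== SOURCE A (Python) =====
-- import typing
--
-- def __prepareSRC_SOLVER(src_solver: list) -> typing.Tuple:
--     """
--     Prepares the solver's source file for the conversion.
--
--     Parameters.
--     -----------
--     src_solver:list
--         The lines of the txt file of the solver's output.
--
--     Returns.
--     --------
--     cleaned_src_solver:list
--         The cleaned src_solver file that does not contain tailed "\\n".
--     order_information:dict
--         The keys are the order ids and the values are dictionaries that contain the start index and the end index of the order in the txt file of the solver.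
--     """
--     cleaned_src_solver = []
--     order_information = {}
--
--     packingPlanIndices = []
--     for lineNr, line in enumerate(src_solver):
--         # remove \n from end of line
--         cleaned_src_solver.append(line.rstrip("\n"))
--         # find the packing plan indices
--         if "PACKING PLAN" in line:
--             packingPlanIndices.append(lineNr)
--     packingPlanIndices.append(len(src_solver))
--
--     while len(packingPlanIndices) > 1:
--         startIdx, endIdx = packingPlanIndices.pop(0) + 1, packingPlanIndices[0]
--
--         orderKey = "001" + str(len(order_information) + 1).zfill(5)
--
--         order_information[orderKey] = {"start": startIdx, "end": endIdx}
--
--     return cleaned_src_solver, order_information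
-- ===== SOURCE B (Python) =====
-- def __prepareSRC_SOLVER(src_solver: list):
--     """One fused pass: clean each line and maintain a 'pending marker' line number;
--     finalize an order whenever the next marker (or the end of file) is reached."""
--     cleaned_src_solver = []
--     order_information = {}
--     pending = None  # line number of the most recent "PACKING PLAN" marker, if any
--     for lineNr, line in enumerate(src_solver):
--         cleaned_src_solver.append(line.rstrip("\n"))
--         if "PACKING PLAN" in line:
--             if pending is not None:
--                 key = "001" + str(len(order_information) + 1).zfill(5)
--                 order_information[key] = {"start": pending + 1, "end": lineNr}
--             pending = lineNr
--     if pending is not None: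
--         key = "001" + str(len(order_information) + 1).zfill(5)
--         order_information[key] = {"start": pending + 1, "end": len(src_solver)}
--     return cleaned_src_solver, order_information
-- ===== Notes on version B (the rewrite author's own statement) =====
-- stated objective: simpler
-- what changed: Replaces A's two-phase scheme (collect all marker indices plus a sentinel, then a destructive while/pop loop pairing consecutive indices) by one fused pass that cleans each line and keeps a single 'pending marker' line number, finalizing an order at each new marker and once after the loop.
import Mathlib
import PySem

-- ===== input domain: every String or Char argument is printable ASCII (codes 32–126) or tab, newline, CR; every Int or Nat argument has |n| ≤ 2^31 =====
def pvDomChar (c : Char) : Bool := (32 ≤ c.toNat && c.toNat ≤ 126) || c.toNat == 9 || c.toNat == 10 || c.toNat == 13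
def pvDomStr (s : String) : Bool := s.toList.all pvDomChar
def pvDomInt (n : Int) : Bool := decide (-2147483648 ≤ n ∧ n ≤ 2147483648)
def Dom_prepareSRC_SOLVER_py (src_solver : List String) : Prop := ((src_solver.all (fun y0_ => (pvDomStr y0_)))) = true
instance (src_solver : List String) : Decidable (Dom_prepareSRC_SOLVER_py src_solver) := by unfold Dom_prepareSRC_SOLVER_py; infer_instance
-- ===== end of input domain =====

-- B fuses A's two phases into one pass with a pending-marker variable; same cost, simpler shape.

-- ===== PORT A =====
-- hand port of line.rstrip("\n") (remove every trailing '\n'); exact: rstrip with an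
-- explicit char set strips exactly the maximal trailing run of those chars
def rstripNl (s : String) : String :=
  String.ofList ((s.toList.reverse.dropWhile (· == '\n')).reverse)

-- the first for-loop's body: append cleaned line, record marker indices
def pvAStep (st : List String × List Int) (p : Int × String) : List String × List Int :=
  (st.1 ++ [rstripNl p.2],
   if PySem.Str.isIn "PACKING PLAN" p.2 then st.2 ++ [p.1] else st.2)

-- the while-loop: pop the first index, pair it with the next one
def pvAWhile : List Int → PySem.Dict String (List (String × Int)) → PySem.Dict String (List (String × Int))
  | a :: b :: rest, d =>
      pvAWhile (b :: rest)
        (d.insert ("001" ++ PySem.Str.zfill (PySem.Int.toStr ((d.size : Int) + 1)) 5)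
          [("start", a + 1), ("end", b)])
  | _, d => d

def prepareSRC_SOLVER_py (src_solver : List String) : List String × (List (String × List (String × Int))) :=
  let st := (PySem.List.enumerate src_solver).foldl pvAStep ([], [])
  let packingPlanIndices := st.2 ++ [(src_solver.length : Int)]
  (st.1, (pvAWhile packingPlanIndices PySem.Dict.empty).items)

-- ===== PORT B =====
-- the fused loop body: clean the line; on a marker, finalize the pending order (if any)
def pvBStep (st : List String × PySem.Dict String (List (String × Int)) × Option Int)
    (p : Int × String) : List String × PySem.Dict String (List (String × Int)) × Option Int :=
  let cleaned := st.1 ++ [rstripNl p.2]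
  if PySem.Str.isIn "PACKING PLAN" p.2 then
    match st.2.2 with
    | some pend =>
        (cleaned,
         st.2.1.insert ("001" ++ PySem.Str.zfill (PySem.Int.toStr ((st.2.1.size : Int) + 1)) 5)
           [("start", pend + 1), ("end", p.1)],
         some p.1)
    | none => (cleaned, st.2.1, some p.1)
  else (cleaned, st.2.1, st.2.2)

-- after the loop: finalize the last pending order with end = len(src_solver)
def pvBFin (n : Int) (st : List String × PySem.Dict String (List (String × Int)) × Option Int) :
    List String × (List (String × List (String × Int))) :=
  match st.2.2 with
  | some pend =>
      (st.1,
       (st.2.1.insert ("001" ++ PySem.Str.zfill (PySem.Int.toStr ((st.2.1.size : Int) + 1)) 5)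
         [("start", pend + 1), ("end", n)]).items)
  | none => (st.1, st.2.1.items)

def prepareSRC_SOLVER_py_alt (src_solver : List String) : List String × (List (String × List (String × Int))) :=
  pvBFin (src_solver.length : Int)
    ((PySem.List.enumerate src_solver).foldl pvBStep ([], PySem.Dict.empty, none))

-- ===== PRECONDITION & SPEC =====
def Spec_prepareSRC_SOLVER_py (src_solver : List String) (out : List String × (List (String × List (String × Int)))) : Prop := out = prepareSRC_SOLVER_py_alt src_solver
instance (src_solver : List String) (out : List String × (List (String × List (String × Int)))) : Decidable (Spec_prepareSRC_SOLVER_py src_solver out) := by unfold Spec_prepareSRC_SOLVER_py; infer_instance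

-- ===== CLAIM (what is proved, stated in full; the proofs are below) =====
def Claim_equal_prepareSRC_SOLVER_py : Prop := ∀ (src_solver : List String), Dom_prepareSRC_SOLVER_py src_solver → Spec_prepareSRC_SOLVER_py src_solver (prepareSRC_SOLVER_py src_solver)

-- ===== LEMMAS AND PROOFS =====

-- marker indices of an (index, line) list
def pvMarkers (l : List (Int × String)) : List Int :=
  (l.filter (fun p => PySem.Str.isIn "PACKING PLAN" p.2)).map (·.1)

lemma pvMarkers_cons (p : Int × String) (l : List (Int × String)) :
    pvMarkers (p :: l) =
      if PySem.Str.isIn "PACKING PLAN" p.2 then p.1 :: pvMarkers l else pvMarkers l := by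
  simp [pvMarkers, List.filter_cons]
  split_ifs <;> simp

lemma pvAFold (l : List (Int × String)) :
    ∀ (c : List String) (ix : List Int),
      l.foldl pvAStep (c, ix) = (c ++ l.map (fun p => rstripNl p.2), ix ++ pvMarkers l) := by
  induction l with
  | nil => intro c ix; simp [pvMarkers]
  | cons p l ih =>
    intro c ix
    rw [List.foldl_cons, pvMarkers_cons]
    cases h : PySem.Str.isIn "PACKING PLAN" p.2 <;>
      · simp only [pvAStep, h]
        simp [ih]

lemma pvBFold (l : List (Int × String)) :
    ∀ (c : List String) (d : PySem.Dict String (List (String × Int))) (pend : Option Int) (n : Int),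
      pvBFin n (l.foldl pvBStep (c, d, pend)) =
        (c ++ l.map (fun p => rstripNl p.2), (pvAWhile (pend.toList ++ pvMarkers l ++ [n]) d).items) := by
  induction l with
  | nil =>
    intro c d pend n
    cases pend <;> simp [pvBFin, pvMarkers, pvAWhile]
  | cons p l ih =>
    intro c d pend n
    rw [List.foldl_cons, pvMarkers_cons]
    cases h : PySem.Str.isIn "PACKING PLAN" p.2
    · cases pend <;>
        · simp only [pvBStep, h]
          simp [ih]
    · cases pend with
      | none =>
        simp only [pvBStep, h]
        simp [ih]
      | some a =>
        simp only [pvBStep, h, if_pos, Option.toList]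
        rw [ih]
        simp [pvAWhile]

-- ===== VERDICT (by name: the statement is the Claim_ definition above) =====
theorem prepareSRC_SOLVER_py_spec : Claim_equal_prepareSRC_SOLVER_py := by
  intro src_solver _
  unfold Spec_prepareSRC_SOLVER_py prepareSRC_SOLVER_py prepareSRC_SOLVER_py_alt
  rw [pvAFold, pvBFold]
  simp
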